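-- pv_equiv track=rewrite | github.com/ratanjyoti/Chat_with_pdfs | code/gutenberg_search.py | _get_text_url
-- ===== SOURCE A (Python) =====
-- def _get_text_url(formats):
--
--     # Only UTF-8 text
--
--     for key in formats:
--
--         if "text/plain; charset=utf-8" in key.lower():
--
--             return formats[key]
--
--     # fallback
--
--     for key in formats:
--
--         if "text/plain" in key.lower():
--
--             return formats[key]
--
--     return None
-- ===== SOURCE B (Python) =====
-- def _get_text_url(formats):
--     # One pass: return the first UTF-8 plain-text URL immediately;
--     # remember the first generic text/plain URL behind a found-flag as fallback.
--     fallback = None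
--     found = False
--     for key, value in formats.items():
--         lk = key.lower()
--         if "text/plain; charset=utf-8" in lk:
--             return value
--         if not found and "text/plain" in lk:
--             fallback = value
--             found = True
--     return fallback if found else None
-- ===== Notes on version B (the rewrite author's own statement) =====
-- stated objective: alternative
-- what changed: Replaces A's two sequential scans plus dict lookup with one single pass over the items that returns a utf-8 match immediately and records the first text/plain value behind a found-flag as fallback.
import Mathlib
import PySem

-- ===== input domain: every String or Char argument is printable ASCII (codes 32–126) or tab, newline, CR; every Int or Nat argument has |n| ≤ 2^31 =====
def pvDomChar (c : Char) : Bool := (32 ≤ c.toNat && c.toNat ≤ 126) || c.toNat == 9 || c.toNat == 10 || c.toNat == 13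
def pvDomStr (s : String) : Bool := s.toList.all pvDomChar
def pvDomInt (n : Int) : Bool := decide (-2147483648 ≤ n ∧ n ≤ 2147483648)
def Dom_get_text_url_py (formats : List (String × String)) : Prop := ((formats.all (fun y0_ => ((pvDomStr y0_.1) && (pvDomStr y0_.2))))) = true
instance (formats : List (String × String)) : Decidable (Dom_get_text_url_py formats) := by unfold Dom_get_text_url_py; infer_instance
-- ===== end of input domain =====

-- B changes the decomposition only (one pass with a found-flag instead of A's two scans); same cost.
-- The Python parameter is a dict; it is received here as its association list, normalized via PySem.Dict.ofList.

-- ===== PORT A =====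
-- A's two 'for key in formats: if needle in key.lower(): return formats[key]' loops are the
-- same loop body with two literal needles; transliterated once, parametrized by the needle.
-- The outer Option says whether the loop returned; 'formats[key]' is d.get? (the key comes
-- from the dict itself, so a KeyError is impossible).
def pvALoop (d : PySem.Dict String String) (needle : String) : List String → Option (Option String)
  | [] => none
  | k :: rest =>
      if PySem.Str.isIn needle (PySem.Str.lower k) then some (d.get? k)
      else pvALoop d needle rest

def get_text_url_py (formats : List (String × String)) : Option String :=
  let d := PySem.Dict.ofList formats
  match pvALoop d "text/plain; charset=utf-8" d.keys with
  | some r => r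
  | none =>
    match pvALoop d "text/plain" d.keys with
    | some r => r
    | none => none

-- ===== PORT B =====
-- single pass over items with (fallback, found-flag) state
def pvBLoop : List (String × String) → Option String → Bool → Option String
  | [], fallback, found => if found then fallback else none
  | (k, v) :: rest, fallback, found =>
      let lk := PySem.Str.lower k
      if PySem.Str.isIn "text/plain; charset=utf-8" lk then some v
      else if !found && PySem.Str.isIn "text/plain" lk then pvBLoop rest (some v) true
      else pvBLoop rest fallback found

def get_text_url_py_alt (formats : List (String × String)) : Option String :=
  pvBLoop (PySem.Dict.ofList formats).items none false

-- ===== PRECONDITION & SPEC =====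
def Spec_get_text_url_py (formats : List (String × String)) (out : Option String) : Prop := out = get_text_url_py_alt formats
instance (formats : List (String × String)) (out : Option String) : Decidable (Spec_get_text_url_py formats out) := by unfold Spec_get_text_url_py; infer_instance

-- ===== CLAIM (what is proved, stated in full; the proofs are below) =====
def Claim_equal_get_text_url_py : Prop := ∀ (formats : List (String × String)), Dom_get_text_url_py formats → Spec_get_text_url_py formats (get_text_url_py formats)

-- ===== LEMMAS AND PROOFS =====

-- A's scan over the keys of a sublist l of d.items equals a find? over l
-- (the dict lookup returns exactly the item's value, since d's keys are unique).
theorem pvALoop_eq_find (d : PySem.Dict String String) (needle : String)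
    (hnd : d.keys.Nodup) :
    ∀ (l : List (String × String)), (∀ kv ∈ l, kv ∈ d.items) →
    pvALoop d needle (l.map Prod.fst)
      = (l.find? (fun kv => PySem.Str.isIn needle (PySem.Str.lower kv.1))).map (fun kv => some kv.2) := by
  intro l
  induction l with
  | nil => intro _; rfl
  | cons kv rest ih =>
    intro hmem
    obtain ⟨k, v⟩ := kv
    rw [List.map_cons]
    show (if PySem.Str.isIn needle (PySem.Str.lower k) = true then some (d.get? k)
          else pvALoop d needle (rest.map Prod.fst)) = _
    rw [List.find?_cons]
    cases h : PySem.Str.isIn needle (PySem.Str.lower k) with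
    | true =>
      rw [if_pos rfl]
      rw [PySem.Dict.get?_of_mem_items d (hmem (k, v) (List.mem_cons_self ..)) hnd]
      rfl
    | false =>
      rw [if_neg (by simp)]
      exact ih (fun kv hkv => hmem kv (List.mem_cons_of_mem _ hkv))

-- B's single pass, characterized by the same two find?s.
theorem pvBLoop_eq_find :
    ∀ (l : List (String × String)) (fallback : Option String) (found : Bool),
    pvBLoop l fallback found
      = match l.find? (fun kv => PySem.Str.isIn "text/plain; charset=utf-8" (PySem.Str.lower kv.1)) with
        | some kv => some kv.2
        | none =>
          if found then fallback
          else
            match l.find? (fun kv => PySem.Str.isIn "text/plain" (PySem.Str.lower kv.1)) with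
            | some kv => some kv.2
            | none => none := by
  intro l
  induction l with
  | nil => intro fallback found; cases found <;> rfl
  | cons kv rest ih =>
    intro fallback found
    obtain ⟨k, v⟩ := kv
    show (if PySem.Str.isIn "text/plain; charset=utf-8" (PySem.Str.lower k) = true then some v
          else if (!found && PySem.Str.isIn "text/plain" (PySem.Str.lower k)) = true
               then pvBLoop rest (some v) true
               else pvBLoop rest fallback found) = _
    rw [List.find?_cons, List.find?_cons]
    cases hu : PySem.Str.isIn "text/plain; charset=utf-8" (PySem.Str.lower k) with
    | true => rw [if_pos rfl]
    | false =>
      rw [if_neg (by simp)]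
      cases found with
      | true =>
        rw [if_neg (by simp)]
        rw [ih]
        rfl
      | false =>
        cases hp : PySem.Str.isIn "text/plain" (PySem.Str.lower k) with
        | true =>
          rw [if_pos (by simp)]
          rw [ih]
          rfl
        | false =>
          rw [if_neg (by simp)]
          rw [ih]

-- the whole equivalence, over any dict with unique keys
theorem pv_main (d : PySem.Dict String String) (hnd : d.keys.Nodup) :
    (match pvALoop d "text/plain; charset=utf-8" d.keys with
     | some r => r
     | none =>
       match pvALoop d "text/plain" d.keys with
       | some r => r
       | none => none)
    = pvBLoop d.items none false := by
  have hkeys : d.keys = d.items.map Prod.fst := rfl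
  rw [hkeys,
      pvALoop_eq_find d "text/plain; charset=utf-8" hnd d.items (fun _ h => h),
      pvALoop_eq_find d "text/plain" hnd d.items (fun _ h => h),
      pvBLoop_eq_find]
  cases d.items.find? (fun kv => PySem.Str.isIn "text/plain; charset=utf-8" (PySem.Str.lower kv.1)) with
  | some kv => rfl
  | none =>
    cases d.items.find? (fun kv => PySem.Str.isIn "text/plain" (PySem.Str.lower kv.1)) with
    | some kv => rfl
    | none => rfl

-- ===== VERDICT (by name: the statement is the Claim_ definition above) =====
theorem get_text_url_py_spec : Claim_equal_get_text_url_py := by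
  intro formats _
  show get_text_url_py formats = get_text_url_py_alt formats
  exact pv_main (PySem.Dict.ofList formats) (PySem.Dict.nodup_keys_ofList formats)
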